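-- pv_equiv track=rewrite | github.com/NVIDIA/cuopt-examples | benchmark_apis/analyze_benchmark_results.py | discover_solvers
-- ===== SOURCE A (Python) =====
-- from typing import Dict, List, Optional, Tuple
--
-- def discover_solvers(headers: List[str]) -> List[str]:
--     """
--     Discover solver names from CSV headers by looking for both *_objective, *_solver_time, and *_total_time patterns.
--
--     Args:
--         headers: List of CSV column headers
--
--     Returns:
--         List of solver names found
--     """
--     solvers = set()
--
--     for header in headers:
--         if header.endswith('_objective'):
--             solver_name = header[:-10]  # Remove '_objective'
--             # Check if both time columns exist
--             if f"{solver_name}_solver_time" in headers and f"{solver_name}_total_time" in headers: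
--                 solvers.add(solver_name)
--
--     return sorted(list(solvers))
-- ===== SOURCE B (Python) =====
-- def discover_solvers(headers):
--     """One pass: partition header prefixes by recognized suffix into three sets, then filter."""
--     obj, st, tt = set(), set(), set()
--     for header in headers:
--         if header.endswith('_objective'):
--             obj.add(header[:-10])
--         elif header.endswith('_solver_time'):
--             st.add(header[:-12])
--         elif header.endswith('_total_time'):
--             tt.add(header[:-11])
--     return sorted(p for p in obj if p in st and p in tt)
-- ===== Notes on version B (the rewrite author's own statement) =====
-- stated objective: alternative
-- what changed: Instead of scanning the whole header list twice for every *_objective header, B makes a single pass classifying each header by its suffix into three prefix sets and then filters the objective prefixes by set membership.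
import Mathlib
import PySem

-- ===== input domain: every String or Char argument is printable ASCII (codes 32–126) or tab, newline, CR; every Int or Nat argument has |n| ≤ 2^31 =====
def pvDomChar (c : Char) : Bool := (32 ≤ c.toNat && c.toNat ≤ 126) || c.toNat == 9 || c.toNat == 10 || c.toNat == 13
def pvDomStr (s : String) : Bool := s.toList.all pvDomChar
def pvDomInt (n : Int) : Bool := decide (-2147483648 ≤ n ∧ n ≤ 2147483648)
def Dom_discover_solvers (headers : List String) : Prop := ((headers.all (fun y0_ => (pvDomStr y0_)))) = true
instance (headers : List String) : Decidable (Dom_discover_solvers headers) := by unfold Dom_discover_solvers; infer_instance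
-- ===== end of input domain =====

-- B makes one pass classifying each header by its recognized suffix into three prefix sets and
-- then filters; a different decomposition from A's per-objective-header membership tests.

-- ===== PORT A =====
-- loop body of A's 'for header in headers'
def pvStepA (headers : List String) (s : PySem.Set String) (header : String) : PySem.Set String :=
  if PySem.Str.endswith header "_objective" then
    let solver_name := PySem.Str.slice header none (some (-10))
    if headers.contains (solver_name ++ "_solver_time") && headers.contains (solver_name ++ "_total_time") then
      PySem.Set.add s solver_name
    else s
  else s

def discover_solvers (headers : List String) : List String :=
  PySem.List.sorted (headers.foldl (pvStepA headers) PySem.Set.empty) (fun x => x) false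

-- ===== PORT B =====
-- loop body of B's single classifying pass; state = (obj, st, tt)
def pvStepB (g : PySem.Set String × PySem.Set String × PySem.Set String) (header : String) :
    PySem.Set String × PySem.Set String × PySem.Set String :=
  if PySem.Str.endswith header "_objective" then
    (PySem.Set.add g.1 (PySem.Str.slice header none (some (-10))), g.2.1, g.2.2)
  else if PySem.Str.endswith header "_solver_time" then
    (g.1, PySem.Set.add g.2.1 (PySem.Str.slice header none (some (-12))), g.2.2)
  else if PySem.Str.endswith header "_total_time" then
    (g.1, g.2.1, PySem.Set.add g.2.2 (PySem.Str.slice header none (some (-11))))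
  else g

def discover_solvers_alt (headers : List String) : List String :=
  let g := headers.foldl pvStepB (PySem.Set.empty, PySem.Set.empty, PySem.Set.empty)
  PySem.List.sorted
    (g.1.filter (fun p => PySem.Set.contains g.2.1 p && PySem.Set.contains g.2.2 p))
    (fun x => x) false

-- ===== PRECONDITION & SPEC =====
def Spec_discover_solvers (headers : List String) (out : List String) : Prop := out = discover_solvers_alt headers
instance (headers : List String) (out : List String) : Decidable (Spec_discover_solvers headers out) := by unfold Spec_discover_solvers; infer_instance

-- ===== CLAIM (what is proved, stated in full; the proofs are below) =====
def Claim_equal_discover_solvers : Prop := ∀ (headers : List String), Dom_discover_solvers headers → Spec_discover_solvers headers (discover_solvers headers)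

-- ===== LEMMAS AND PROOFS =====

-- endswith as a suffix fact on code points
theorem pv_endswith_iff (s suf : String) :
    PySem.Str.endswith s suf = true ↔ suf.toList <:+ s.toList := by
  simp [pysem, PySem.Chars.endswith_iff]

-- stripping a suffix of length k (k = 10, 11, 12 below)
theorem pv_strip_iff (s x suf : String) (k : Nat) (hk : suf.toList.length = k) (h1 : 1 < k)
    (hs : PySem.Str.endswith s suf = true) :
    (PySem.Str.slice s none (some (-(k : Int))) = x ↔ s = x ++ suf) := by
  rw [pv_endswith_iff] at hs
  obtain ⟨u, hu⟩ := hs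
  constructor
  · intro h
    rw [← h]
    apply String.toList_inj.mp
    rw [String.toList_append]
    have : (PySem.Str.slice s none (some (-(k : Int)))).toList = s.toList.take (s.toList.length - k) := by
      simp only [pysem]
      rw [PySem.List.slice_to_neg_natCast _ _ (by omega : 0 < k)]
    rw [this, ← hu, List.length_append, hk]
    simp
  · intro h
    apply String.toList_inj.mp
    have hsl : s.toList = x.toList ++ suf.toList := by rw [h, String.toList_append]
    have : (PySem.Str.slice s none (some (-(k : Int)))).toList = s.toList.take (s.toList.length - k) := by
      simp only [pysem]
      rw [PySem.List.slice_to_neg_natCast _ _ (by omega : 0 < k)]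
    rw [this, hsl, List.length_append, hk]
    simp

-- a header ending in one recognized suffix ends in no other
theorem pv_excl_st_obj (s : String) (h : PySem.Str.endswith s "_solver_time" = true) :
    PySem.Str.endswith s "_objective" = false := by
  rw [pv_endswith_iff] at h
  rw [Bool.eq_false_iff, Ne, pv_endswith_iff]
  intro h2
  have := List.suffix_of_suffix_length_le h2 h (by decide)
  revert this; decide

theorem pv_excl_tt_obj (s : String) (h : PySem.Str.endswith s "_total_time" = true) :
    PySem.Str.endswith s "_objective" = false := by
  rw [pv_endswith_iff] at h
  rw [Bool.eq_false_iff, Ne, pv_endswith_iff]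
  intro h2
  have := List.suffix_of_suffix_length_le h2 h (by decide)
  revert this; decide

theorem pv_excl_tt_st (s : String) (h : PySem.Str.endswith s "_total_time" = true) :
    PySem.Str.endswith s "_solver_time" = false := by
  rw [pv_endswith_iff] at h
  rw [Bool.eq_false_iff, Ne, pv_endswith_iff]
  intro h2
  have := List.suffix_of_suffix_length_le h h2 (by decide)
  revert this; decide

-- 'header = x ++ suf' characterizations of each branch firing with prefix x
theorem pv_obj_char (h x : String) :
    (PySem.Str.endswith h "_objective" = true ∧ PySem.Str.slice h none (some (-10)) = x)
      ↔ h = x ++ "_objective" := by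
  constructor
  · rintro ⟨he, hp⟩
    exact (pv_strip_iff h x "_objective" 10 (by decide) (by decide) he).mp (by exact_mod_cast hp)
  · intro h'
    have he : PySem.Str.endswith h "_objective" = true := by
      rw [pv_endswith_iff, h', String.toList_append]; exact List.suffix_append _ _
    refine ⟨he, ?_⟩
    exact_mod_cast (pv_strip_iff h x "_objective" 10 (by decide) (by decide) he).mpr h'

theorem pv_st_char (h x : String) :
    (PySem.Str.endswith h "_solver_time" = true ∧ PySem.Str.slice h none (some (-12)) = x)
      ↔ h = x ++ "_solver_time" := by
  constructor
  · rintro ⟨he, hp⟩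
    exact (pv_strip_iff h x "_solver_time" 12 (by decide) (by decide) he).mp (by exact_mod_cast hp)
  · intro h'
    have he : PySem.Str.endswith h "_solver_time" = true := by
      rw [pv_endswith_iff, h', String.toList_append]; exact List.suffix_append _ _
    refine ⟨he, ?_⟩
    exact_mod_cast (pv_strip_iff h x "_solver_time" 12 (by decide) (by decide) he).mpr h'

theorem pv_tt_char (h x : String) :
    (PySem.Str.endswith h "_total_time" = true ∧ PySem.Str.slice h none (some (-11)) = x)
      ↔ h = x ++ "_total_time" := by
  constructor
  · rintro ⟨he, hp⟩
    exact (pv_strip_iff h x "_total_time" 11 (by decide) (by decide) he).mp (by exact_mod_cast hp)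
  · intro h'
    have he : PySem.Str.endswith h "_total_time" = true := by
      rw [pv_endswith_iff, h', String.toList_append]; exact List.suffix_append _ _
    refine ⟨he, ?_⟩
    exact_mod_cast (pv_strip_iff h x "_total_time" 11 (by decide) (by decide) he).mpr h'

-- membership in A's accumulated set
theorem pv_memA (full : List String) (hs : List String) (s : PySem.Set String) (x : String) :
    x ∈ hs.foldl (pvStepA full) s ↔
      x ∈ s ∨ ((x ++ "_objective") ∈ hs ∧
        full.contains (x ++ "_solver_time") = true ∧ full.contains (x ++ "_total_time") = true) := by
  induction hs generalizing s with
  | nil => simp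
  | cons h t ih =>
    rw [List.foldl_cons, ih]
    have hstep : x ∈ pvStepA full s h ↔
        x ∈ s ∨ (h = x ++ "_objective" ∧
          full.contains (x ++ "_solver_time") = true ∧ full.contains (x ++ "_total_time") = true) := by
      unfold pvStepA
      dsimp only
      split_ifs with h1 h2
      · rw [PySem.Set.mem_add]
        constructor
        · rintro (hx | hx)
          · exact Or.inl hx
          · rw [Bool.and_eq_true] at h2
            exact Or.inr ⟨(pv_obj_char h x).mp ⟨h1, hx.symm⟩, by rw [hx]; exact h2.1, by rw [hx]; exact h2.2⟩
        · rintro (hx | ⟨hh, _⟩)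
          · exact Or.inl hx
          · exact Or.inr (((pv_obj_char h x).mpr hh).2.symm)
      · constructor
        · exact Or.inl
        · rintro (hx | ⟨hh, hc1, hc2⟩)
          · exact hx
          · exfalso
            have h3 := (pv_obj_char h x).mpr hh
            rw [h3.2] at h2
            exact h2 (by rw [Bool.and_eq_true]; exact ⟨hc1, hc2⟩)
      · constructor
        · exact Or.inl
        · rintro (hx | ⟨hh, _⟩)
          · exact hx
          · exact absurd ((pv_obj_char h x).mpr hh).1 h1
    rw [List.mem_cons]
    constructor
    · rintro (hm | ⟨hm, hc⟩)
      · rcases hstep.mp hm with hx | ⟨hh, hc⟩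
        · exact Or.inl hx
        · exact Or.inr ⟨Or.inl hh.symm, hc⟩
      · exact Or.inr ⟨Or.inr hm, hc⟩
    · rintro (hx | ⟨hh | hm, hc⟩)
      · exact Or.inl (hstep.mpr (Or.inl hx))
      · exact Or.inl (hstep.mpr (Or.inr ⟨hh.symm, hc⟩))
      · exact Or.inr ⟨hm, hc⟩

-- membership in B's three accumulated sets
theorem pv_memB (hs : List String) (g : PySem.Set String × PySem.Set String × PySem.Set String) (x : String) :
    ((x ∈ (hs.foldl pvStepB g).1 ↔ x ∈ g.1 ∨ (x ++ "_objective") ∈ hs) ∧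
     (x ∈ (hs.foldl pvStepB g).2.1 ↔ x ∈ g.2.1 ∨ (x ++ "_solver_time") ∈ hs) ∧
     (x ∈ (hs.foldl pvStepB g).2.2 ↔ x ∈ g.2.2 ∨ (x ++ "_total_time") ∈ hs)) := by
  induction hs generalizing g with
  | nil => simp
  | cons h t ih =>
    rw [List.foldl_cons]
    obtain ⟨i1, i2, i3⟩ := ih (pvStepB g h)
    have s1 : x ∈ (pvStepB g h).1 ↔ x ∈ g.1 ∨ x ++ "_objective" = h := by
      unfold pvStepB
      split_ifs with h1 h2 h3 <;> try simp only [PySem.Set.mem_add]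
      · constructor
        · rintro (hx | hx)
          · exact Or.inl hx
          · exact Or.inr ((pv_obj_char h x).mp ⟨h1, hx.symm⟩).symm
        · rintro (hx | hh)
          · exact Or.inl hx
          · exact Or.inr (((pv_obj_char h x).mpr hh.symm).2.symm)
      all_goals
        constructor
        · exact Or.inl
        · rintro (hx | hh)
          · exact hx
          · exact absurd ((pv_obj_char h x).mpr hh.symm).1 h1
    have s2 : x ∈ (pvStepB g h).2.1 ↔ x ∈ g.2.1 ∨ x ++ "_solver_time" = h := by
      unfold pvStepB
      split_ifs with h1 h2 h3 <;> try simp only [PySem.Set.mem_add]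
      · constructor
        · exact Or.inl
        · rintro (hx | hh)
          · exact hx
          · exact absurd ((hh ▸ h1).symm.trans
              (pv_excl_st_obj (x ++ "_solver_time") (((pv_st_char _ x).mpr rfl).1))) (by decide)
      · constructor
        · rintro (hx | hx)
          · exact Or.inl hx
          · exact Or.inr ((pv_st_char h x).mp ⟨h2, hx.symm⟩).symm
        · rintro (hx | hh)
          · exact Or.inl hx
          · exact Or.inr (((pv_st_char h x).mpr hh.symm).2.symm)
      all_goals
        constructor
        · exact Or.inl
        · rintro (hx | hh)
          · exact hx
          · exact absurd ((pv_st_char h x).mpr hh.symm).1 h2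
    have s3 : x ∈ (pvStepB g h).2.2 ↔ x ∈ g.2.2 ∨ x ++ "_total_time" = h := by
      unfold pvStepB
      split_ifs with h1 h2 h3 <;> try simp only [PySem.Set.mem_add]
      · constructor
        · exact Or.inl
        · rintro (hx | hh)
          · exact hx
          · exact absurd ((hh ▸ h1).symm.trans
              (pv_excl_tt_obj (x ++ "_total_time") (((pv_tt_char _ x).mpr rfl).1))) (by decide)
      · constructor
        · exact Or.inl
        · rintro (hx | hh)
          · exact hx
          · exact absurd ((hh ▸ h2).symm.trans
              (pv_excl_tt_st (x ++ "_total_time") (((pv_tt_char _ x).mpr rfl).1))) (by decide)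
      · constructor
        · rintro (hx | hx)
          · exact Or.inl hx
          · exact Or.inr ((pv_tt_char h x).mp ⟨h3, hx.symm⟩).symm
        · rintro (hx | hh)
          · exact Or.inl hx
          · exact Or.inr (((pv_tt_char h x).mpr hh.symm).2.symm)
      · constructor
        · exact Or.inl
        · rintro (hx | hh)
          · exact hx
          · exact absurd ((pv_tt_char h x).mpr hh.symm).1 h3
    refine ⟨?_, ?_, ?_⟩
    · rw [i1, s1, List.mem_cons, or_assoc]
    · rw [i2, s2, List.mem_cons, or_assoc]
    · rw [i3, s3, List.mem_cons, or_assoc]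

-- nodup of A's accumulated set
theorem pv_nodupA (full hs : List String) (s : PySem.Set String) (hn : s.Nodup) :
    (hs.foldl (pvStepA full) s).Nodup := by
  induction hs generalizing s with
  | nil => exact hn
  | cons h t ih =>
    rw [List.foldl_cons]
    apply ih
    unfold pvStepA
    dsimp only
    split_ifs <;> first | exact PySem.Set.nodup_add _ _ hn | exact hn

-- nodup of B's objective set
theorem pv_nodupB (hs : List String) (g : PySem.Set String × PySem.Set String × PySem.Set String)
    (hn : g.1.Nodup) : (hs.foldl pvStepB g).1.Nodup := by
  induction hs generalizing g with
  | nil => exact hn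
  | cons h t ih =>
    rw [List.foldl_cons]
    apply ih
    unfold pvStepB
    split_ifs <;> try dsimp only
    all_goals first | exact PySem.Set.nodup_add _ _ hn | exact hn

-- ===== VERDICT (by name: the statement is the Claim_ definition above) =====
theorem discover_solvers_spec : Claim_equal_discover_solvers := by
  intro headers _
  unfold Spec_discover_solvers discover_solvers discover_solvers_alt
  apply PySem.List.sorted_eq_sorted_of_perm _ _ _ (fun a b h => h)
  apply (List.perm_ext_iff_of_nodup
    (pv_nodupA headers headers PySem.Set.empty List.nodup_nil)
    ((pv_nodupB headers _ List.nodup_nil).filter _)).mpr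
  intro a
  rw [List.mem_filter, pv_memA headers headers PySem.Set.empty a]
  obtain ⟨m1, m2, m3⟩ := pv_memB headers (PySem.Set.empty, PySem.Set.empty, PySem.Set.empty) a
  simp only [PySem.Set.empty, List.not_mem_nil, false_or] at m1 m2 m3
  simp only [PySem.Set.empty, Bool.and_eq_true, PySem.Set.contains, List.contains_iff_mem, m1, m2, m3]
  tauto
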